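-- pv_equiv track=rewrite | github.com/MiguelCacerex/AnalizadorLexico | operadoresComparacion.py | tipo_operador_comparacion
-- ===== SOURCE A (Python) =====
-- def tipo_operador_comparacion(entrada):
--     lexemas = []  # Lista para almacenar los lexemas encontrados
--     i = 0  # Variable de índice para recorrer la cadena de entrada
--
--     # Itera hasta el penúltimo carácter para verificar operadores de 2 caracteres
--     while i < len(entrada) - 1:
--         # Verifica si el segmento de 2 caracteres es un operador de comparación de 2 caracteres
--         if entrada[i:i+2] in ('==', '!=', '<=', '>='):
--             inicio = i  # Guarda la posición inicial del operador
--             lexema = entrada[i:i+2]  # Extrae el operador completo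
--             # Agrega el operador a la lista de lexemas
--             lexemas.append(('OPERADOR_COMPARACION', lexema, inicio, inicio+1))
--             # Avanza al siguiente par de caracteres (operador de 2 caracteres)
--             i += 2
--         elif entrada[i] in ('<', '>'):  # Verifica si el carácter actual es '<' o '>'
--             inicio = i  # Guarda la posición inicial del operador
--             lexema = entrada[i]  # Extrae el operador '<' o '>'
--             # Agrega el operador a la lista de lexemas
--             lexemas.append(('OPERADOR_COMPARACION', lexema, inicio, inicio))
--             i += 1  # Avanza al siguiente carácter
--         else:
--             i += 1  # Avanza al siguiente carácter si no es un operador de comparación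
--
--     if not lexemas:
--         return []  # Si no se encontraron operadores de comparación, retorna una lista vacía
--     else:
--         return lexemas  # Retorna la lista de lexemas encontrados
-- ===== SOURCE B (Python) =====
-- def tipo_operador_comparacion(entrada):
--     # Staged passes instead of a stateful scan:
--     # 1) all positions where a two-char comparison operator occurs,
--     # 2) greedy left-biased resolution of overlapping candidates,
--     # 3) lone '<'/'>' by a purely local test,
--     # 4) merge the two token streams by position.
--     n = len(entrada)
--     candidatos = [i for i in range(n - 1) if entrada[i:i+2] in ('==', '!=', '<=', '>=')]
--     dobles = []
--     for i in candidatos: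
--         if dobles and dobles[-1] == i - 1:
--             continue  # overlaps the previously kept candidate
--         dobles.append(i)
--     simples = [i for i in range(n - 1)
--                if entrada[i] in ('<', '>') and entrada[i+1] != '=']
--     tokens = [('OPERADOR_COMPARACION', entrada[i:i+2], i, i + 1) for i in dobles]
--     tokens += [('OPERADOR_COMPARACION', entrada[i], i, i) for i in simples]
--     return sorted(tokens, key=lambda t: t[2])
-- ===== Notes on version B (the rewrite author's own statement) =====
-- stated objective: alternative
-- what changed: Replaces A's single stateful index-stepping scan (while loop with manual i += 1/2) by staged passes: collect all candidate two-char operator positions, resolve overlapping candidates greedily against the last kept position, collect lone '<'/'>' by a purely local test on the adjacent character, and merge the two token streams by sorting on position.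
import Mathlib
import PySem

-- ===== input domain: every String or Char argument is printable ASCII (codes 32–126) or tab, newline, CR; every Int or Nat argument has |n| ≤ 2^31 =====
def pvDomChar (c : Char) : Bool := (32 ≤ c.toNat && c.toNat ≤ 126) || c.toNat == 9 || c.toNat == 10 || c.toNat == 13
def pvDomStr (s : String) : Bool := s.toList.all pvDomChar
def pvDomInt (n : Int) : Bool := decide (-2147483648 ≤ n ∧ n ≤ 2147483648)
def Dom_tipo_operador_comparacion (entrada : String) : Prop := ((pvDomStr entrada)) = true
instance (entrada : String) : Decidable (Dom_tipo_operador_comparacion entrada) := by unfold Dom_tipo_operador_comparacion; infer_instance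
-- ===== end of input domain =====

-- B tokenizes by staged passes (candidate two-char positions, greedy overlap resolution,
-- local single-char pass, merge by sorting on position) instead of A's stateful index scan (alternative).


-- ===== PORT A =====
-- while i < len(entrada) - 1 with i += 1 / i += 2; i stays a Nat (Python's i starts at 0 and only grows),
-- so 'i < len - 1' is 'i + 1 < len'; entrada[i:i+2] is PySem.List.slice, entrada[i] is a (provably in-range) getElem.
def pvA_loop (cs : List Char) (i : Nat)
    (lexemas : List (String × String × Int × Int)) : List (String × String × Int × Int) :=
  if h : i + 1 < cs.length then
    let seg := PySem.List.slice cs (some (i : Int)) (some ((i : Int) + 2))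
    if seg = ['=', '='] ∨ seg = ['!', '='] ∨ seg = ['<', '='] ∨ seg = ['>', '='] then
      pvA_loop cs (i + 2)
        (lexemas ++ [("OPERADOR_COMPARACION", String.ofList seg, (i : Int), (i : Int) + 1)])
    else
      let c := cs[i]'(by omega)
      if c = '<' ∨ c = '>' then
        pvA_loop cs (i + 1)
          (lexemas ++ [("OPERADOR_COMPARACION", String.ofList [c], (i : Int), (i : Int))])
      else
        pvA_loop cs (i + 1) lexemas
  else lexemas
termination_by cs.length - i

def tipo_operador_comparacion (entrada : String) : List (String × String × Int × Int) :=
  let lexemas := pvA_loop entrada.toList 0 []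
  if lexemas = [] then [] else lexemas

-- ===== PORT B =====
-- Source B: staged passes.  range(n-1) is PySem.List.pyRange, entrada[i:i+2] is PySem.List.slice,
-- entrada[i] is PySem.List.pyGetD (always in range here); 'dobles and dobles[-1] == i - 1' is
-- exactly 'pyGet? dobles (-1) = some (i - 1)' (pyGet? [] (-1) = none covers the emptiness guard);
-- sorted(tokens, key=lambda t: t[2]) is PySem.List.sorted with key t.2.2.1.
def tipo_operador_comparacion_alt (entrada : String) : List (String × String × Int × Int) :=
  let cs := entrada.toList
  let n : Int := (cs.length : Int)
  let candidatos := (PySem.List.pyRange 0 (n - 1) 1).filter (fun i =>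
    decide (PySem.List.slice cs (some i) (some (i + 2)) = ['=', '='] ∨
            PySem.List.slice cs (some i) (some (i + 2)) = ['!', '='] ∨
            PySem.List.slice cs (some i) (some (i + 2)) = ['<', '='] ∨
            PySem.List.slice cs (some i) (some (i + 2)) = ['>', '=']))
  let dobles := candidatos.foldl (fun s i =>
    if PySem.List.pyGet? s (-1) = some (i - 1) then s else s ++ [i]) []
  let simples := (PySem.List.pyRange 0 (n - 1) 1).filter (fun i =>
    decide ((PySem.List.pyGetD cs i ' ' = '<' ∨ PySem.List.pyGetD cs i ' ' = '>') ∧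
            PySem.List.pyGetD cs (i + 1) ' ' ≠ '='))
  let tokens :=
    dobles.map (fun i =>
      ("OPERADOR_COMPARACION", String.ofList (PySem.List.slice cs (some i) (some (i + 2))), i, i + 1))
    ++ simples.map (fun i =>
      ("OPERADOR_COMPARACION", String.ofList [PySem.List.pyGetD cs i ' '], i, i))
  PySem.List.sorted tokens (fun t => t.2.2.1)

-- ===== PRECONDITION & SPEC =====
def Spec_tipo_operador_comparacion (entrada : String) (out : List (String × String × Int × Int)) : Prop := out = tipo_operador_comparacion_alt entrada
instance (entrada : String) (out : List (String × String × Int × Int)) : Decidable (Spec_tipo_operador_comparacion entrada out) := by unfold Spec_tipo_operador_comparacion; infer_instance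

-- ===== CLAIM (what is proved, stated in full; the proofs are below) =====
def Claim_equal_tipo_operador_comparacion : Prop := ∀ (entrada : String), Dom_tipo_operador_comparacion entrada → Spec_tipo_operador_comparacion entrada (tipo_operador_comparacion entrada)

-- ===== LEMMAS AND PROOFS =====

-- the two token shapes
def pvTokF (a b : Char) (p : Int) : String × String × Int × Int :=
  ("OPERADOR_COMPARACION", String.ofList [a, b], p, p + 1)
def pvTokG (a : Char) (p : Int) : String × String × Int × Int :=
  ("OPERADOR_COMPARACION", String.ofList [a], p, p)

-- character tests
def pvPairB (a b : Char) : Bool :=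
  decide ([a, b] = ['=', '='] ∨ [a, b] = ['!', '='] ∨ [a, b] = ['<', '='] ∨ [a, b] = ['>', '='])
def pvLG (a : Char) : Bool := decide (a = '<' ∨ a = '>')
def pvSingB (a b : Char) : Bool := pvLG a && decide (b ≠ '=')

lemma pvPairB_iff (a b : Char) :
    pvPairB a b = true ↔
      ([a, b] = ['=', '='] ∨ [a, b] = ['!', '='] ∨ [a, b] = ['<', '='] ∨ [a, b] = ['>', '=']) := by
  simp [pvPairB]

lemma pvLG_iff (a : Char) : pvLG a = true ↔ (a = '<' ∨ a = '>') := by simp [pvLG]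

lemma pvSingB_iff (a b : Char) : pvSingB a b = true ↔ ((a = '<' ∨ a = '>') ∧ b ≠ '=') := by
  simp [pvSingB, pvLG]

lemma pvPairB_snd {a b : Char} (h : pvPairB a b = true) : b = '=' := by
  rw [pvPairB_iff] at h; rcases h with h | h | h | h <;> simp_all

lemma pvPairB_of {a b : Char} (ha : a = '<' ∨ a = '>') (hb : b = '=') : pvPairB a b = true := by
  rw [pvPairB_iff]; rcases ha with h | h <;> subst h <;> subst hb <;> simp

-- reference scanner both ports are reduced to: one step per position, 'bl' = previous
-- position started a kept two-char operator (so the current one is covered)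
def pvScan : List Char → Int → Bool → List (String × String × Int × Int)
  | a :: b :: rest, p, bl =>
    if pvPairB a b then
      if bl then pvScan (b :: rest) (p + 1) false
      else pvTokF a b p :: pvScan (b :: rest) (p + 1) true
    else if bl then pvScan (b :: rest) (p + 1) false
    else if pvSingB a b then pvTokG a p :: pvScan (b :: rest) (p + 1) false
    else pvScan (b :: rest) (p + 1) false
  | _, _, _ => []

-- A-side intermediate: the jump-by-two recursion A's while loop performs
def pvGo : List Char → Int → List (String × String × Int × Int)
  | a :: b :: rest, pos =>
    if pvPairB a b then pvTokF a b pos :: pvGo rest (pos + 2)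
    else if pvLG a then pvTokG a pos :: pvGo (b :: rest) (pos + 1)
    else pvGo (b :: rest) (pos + 1)
  | _, _ => []

-- B-side intermediates
-- generic "filter a position range by a test on the pair of characters there, then map"
def pvGen {τ : Type} (q : Char → Char → Bool) (e : Char → Char → Int → τ) :
    List Char → Int → List τ
  | a :: b :: rest, p => (if q a b then [e a b p] else []) ++ pvGen q e (b :: rest) (p + 1)
  | _, _ => []

-- kept two-char positions after greedy overlap resolution
def pvT : List Char → Int → Bool → List Int
  | a :: b :: rest, p, bl =>
    if pvPairB a b then
      if bl then pvT (b :: rest) (p + 1) false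
      else p :: pvT (b :: rest) (p + 1) true
    else pvT (b :: rest) (p + 1) false
  | _, _, _ => []

-- the corresponding two-char tokens
def pvTpl : List Char → Int → Bool → List (String × String × Int × Int)
  | a :: b :: rest, p, bl =>
    if pvPairB a b then
      if bl then pvTpl (b :: rest) (p + 1) false
      else pvTokF a b p :: pvTpl (b :: rest) (p + 1) true
    else pvTpl (b :: rest) (p + 1) false
  | _, _, _ => []

lemma pvA_drop_two (cs : List Char) (i : Nat) (h : i + 1 < cs.length) :
    cs.drop i = cs[i]'(by omega) :: cs[i+1]'(by omega) :: cs.drop (i+2) := by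
  rw [List.drop_eq_getElem_cons (by omega), List.drop_eq_getElem_cons (by omega)]

lemma pvA_twochar (cs : List Char) (i : Nat) (h : i + 1 < cs.length) :
    PySem.List.slice cs (some (i : Int)) (some ((i : Int) + 2))
      = [cs[i]'(by omega), cs[i+1]'(by omega)] := by
  have e : ((i : Int) + 2) = ((i + 2 : Nat) : Int) := by push_cast; ring
  rw [e, PySem.List.slice_natCast]
  have e2 : i + 2 - i = 2 := by omega
  rw [e2, pvA_drop_two cs i h]
  rfl

-- ---------- A = pvGo ----------
lemma pvA_loop_eq_go (cs : List Char) (i : Nat) (acc : List (String × String × Int × Int)) :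
    pvA_loop cs i acc = acc ++ pvGo (cs.drop i) (i : Int) := by
  induction i, acc using pvA_loop.induct cs with
  | case1 i acc h seg htwo ih =>
    have hs : seg = [cs[i]'(by omega), cs[i+1]'(by omega)] := by
      have : seg = PySem.List.slice cs (some (i : Int)) (some ((i : Int) + 2)) := rfl
      rw [this, pvA_twochar cs i h]
    rw [hs] at htwo ih
    conv_lhs => rw [pvA_loop]
    simp only [dif_pos h, pvA_twochar cs i h]
    rw [if_pos htwo, ih]
    rw [pvA_drop_two cs i h, pvGo]
    rw [if_pos ((pvPairB_iff _ _).mpr htwo)]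
    push_cast
    simp [pvTokF]
  | case2 i acc h seg htwo c hc ih =>
    have hs : seg = [cs[i]'(by omega), cs[i+1]'(by omega)] := by
      have : seg = PySem.List.slice cs (some (i : Int)) (some ((i : Int) + 2)) := rfl
      rw [this, pvA_twochar cs i h]
    rw [hs] at htwo
    have hcdef : c = cs[i]'(by omega) := rfl
    conv_lhs => rw [pvA_loop]
    simp only [dif_pos h, pvA_twochar cs i h]
    rw [if_neg htwo]
    rw [← hcdef, if_pos hc, ih]
    have hd1 : cs.drop (i+1) = cs[i+1]'(by omega) :: cs.drop (i+2) := by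
      rw [List.drop_eq_getElem_cons (by omega)]
    rw [pvA_drop_two cs i h, hd1, pvGo]
    have hB : ¬ pvPairB (cs[i]'(by omega)) (cs[i+1]'(by omega)) = true := by
      intro hcon; exact htwo ((pvPairB_iff _ _).mp hcon)
    rw [if_neg hB]
    rw [hcdef] at hc
    rw [if_pos ((pvLG_iff _).mpr hc)]
    push_cast
    simp [pvTokG, hcdef]
  | case3 i acc h seg htwo c hc ih =>
    have hs : seg = [cs[i]'(by omega), cs[i+1]'(by omega)] := by
      have : seg = PySem.List.slice cs (some (i : Int)) (some ((i : Int) + 2)) := rfl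
      rw [this, pvA_twochar cs i h]
    rw [hs] at htwo
    have hcdef : c = cs[i]'(by omega) := rfl
    conv_lhs => rw [pvA_loop]
    simp only [dif_pos h, pvA_twochar cs i h]
    rw [if_neg htwo]
    rw [← hcdef, if_neg hc, ih]
    have hd1 : cs.drop (i+1) = cs[i+1]'(by omega) :: cs.drop (i+2) := by
      rw [List.drop_eq_getElem_cons (by omega)]
    rw [pvA_drop_two cs i h, hd1, pvGo]
    have hB : ¬ pvPairB (cs[i]'(by omega)) (cs[i+1]'(by omega)) = true := by
      intro hcon; exact htwo ((pvPairB_iff _ _).mp hcon)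
    rw [if_neg hB]
    rw [hcdef] at hc
    have hL : ¬ pvLG (cs[i]'(by omega)) = true := by
      intro hcon; exact hc ((pvLG_iff _).mp hcon)
    rw [if_neg hL]
    push_cast
    simp
  | case4 i acc h =>
    rw [pvA_loop, dif_neg h]
    have hlen : (cs.drop i).length ≤ 1 := by simp; omega
    rcases he : cs.drop i with _ | ⟨a, rest⟩
    · simp [pvGo]
    · rcases rest with _ | ⟨b, t⟩
      · simp [pvGo]
      · rw [he] at hlen; simp at hlen

-- ---------- pvGo = pvScan ----------
lemma pvScan_blocked (b : Char) (rest : List Char) (q : Int) :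
    pvScan (b :: rest) q true = pvScan rest (q + 1) false := by
  cases rest with
  | nil => simp [pvScan]
  | cons c r =>
    by_cases h : pvPairB b c = true
    · simp [pvScan, h]
    · simp [pvScan, h]

lemma pvGo_eq_scan (cs : List Char) (p : Int) : pvGo cs p = pvScan cs p false := by
  induction cs, p using pvGo.induct with
  | case1 a b rest pos h ih =>
    rw [pvGo, if_pos h, pvScan, if_pos h]
    simp only [Bool.false_eq_true, if_false]
    rw [pvScan_blocked, show pos + 1 + 1 = pos + 2 by ring, ih]
  | case2 a b rest pos h hl ih =>
    have hb : b ≠ '=' := fun hb => h (pvPairB_of ((pvLG_iff a).mp hl) hb)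
    rw [pvGo, if_neg h, if_pos hl, pvScan, if_neg h]
    simp only [Bool.false_eq_true, if_false]
    rw [if_pos (by rw [pvSingB_iff]; exact ⟨(pvLG_iff a).mp hl, hb⟩), ih]
  | case3 a b rest pos h hl ih =>
    rw [pvGo, if_neg h, if_neg hl, pvScan, if_neg h]
    simp only [Bool.false_eq_true, if_false]
    rw [if_neg (by simp [pvSingB, hl]), ih]
  | case4 cs pos h =>
    match cs with
    | [] => simp [pvGo, pvScan]
    | [a] => simp [pvGo, pvScan]
    | a :: b :: t => exact absurd rfl (h a b t)

-- ---------- B's range-filter passes are the structural pair recursions ----------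
lemma pvGen_eq {τ : Type} (cs : List Char) (pred : Int → Bool) (f : Int → τ)
    (q : Char → Char → Bool) (e : Char → Char → Int → τ)
    (hpred : ∀ k : Nat, k + 1 < cs.length → pred ↑k = q (cs.getD k ' ') (cs.getD (k+1) ' '))
    (hf : ∀ k : Nat, k + 1 < cs.length → f ↑k = e (cs.getD k ' ') (cs.getD (k+1) ' ') ↑k) :
    ∀ (fuel j : Nat), cs.length - j ≤ fuel →
      ((PySem.List.pyRange (j : Int) ((cs.length : Int) - 1) 1).filter pred).map f
        = pvGen q e (cs.drop j) (j : Int) := by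
  intro fuel
  induction fuel with
  | zero =>
    intro j hj
    have h0 : ((cs.length : Int) - 1 - (j : Int)).toNat = 0 := by omega
    rw [PySem.List.pyRange_one, h0]
    rw [List.drop_eq_nil_of_le (by omega)]
    simp [pvGen]
  | succ fuel ih =>
    intro j hj
    by_cases hlt : j + 1 < cs.length
    · have hcons := PySem.List.pyRange_one_cons
        (show (j : Int) < (cs.length : Int) - 1 by omega)
      rw [hcons]
      have hgd : cs.getD j ' ' = cs[j]'(by omega) := List.getD_eq_getElem cs ' ' (by omega)
      have hgd1 : cs.getD (j+1) ' ' = cs[j+1]'(by omega) := List.getD_eq_getElem cs ' ' (by omega)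
      have hd : cs.drop j = cs.getD j ' ' :: cs.getD (j+1) ' ' :: cs.drop (j+2) := by
        rw [hgd, hgd1]; exact pvA_drop_two cs j hlt
      have hd1 : cs.drop (j+1) = cs.getD (j+1) ' ' :: cs.drop (j+2) := by
        rw [hgd1]; rw [List.drop_eq_getElem_cons (by omega)]
      have hrec : ((PySem.List.pyRange ((j : Int) + 1) ((cs.length : Int) - 1) 1).filter pred).map f
          = pvGen q e (cs.drop (j+1)) ((j : Int) + 1) := by
        have := ih (j+1) (by omega)
        rw [show (((j:Nat)+1 : Nat) : Int) = (j : Int) + 1 by push_cast; ring] at this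
        exact this
      rw [hd, pvGen, ← hd1, ← hrec]
      rw [List.filter_cons]
      rw [hpred j hlt]
      by_cases hq : q (cs.getD j ' ') (cs.getD (j+1) ' ') = true
      · rw [hq]
        simp only [if_true]
        rw [List.map_cons, hf j hlt]
        simp
      · rw [Bool.not_eq_true] at hq
        rw [hq]
        simp
    · have h0 : ((cs.length : Int) - 1 - (j : Int)).toNat = 0 := by omega
      rw [PySem.List.pyRange_one, h0]
      simp only [List.range_zero, List.map_nil, List.filter_nil]
      have hlen : (cs.drop j).length ≤ 1 := by simp; omega
      rcases he : cs.drop j with _ | ⟨a, rest⟩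
      · simp [pvGen]
      · rcases rest with _ | ⟨b, t⟩
        · simp [pvGen]
        · rw [he] at hlen; simp at hlen

-- ---------- the greedy fold over the candidates is pvT ----------
lemma pvFold_eq_T (cs : List Char) : ∀ (p : Int) (s : List Int), (∀ x ∈ s, x < p) →
    (pvGen pvPairB (fun _ _ q => q) cs p).foldl
        (fun s i => if PySem.List.pyGet? s (-1) = some (i - 1) then s else s ++ [i]) s
      = s ++ pvT cs p (decide (s.getLast? = some (p - 1))) := by
  induction cs with
  | nil => intro p s h; simp [pvGen, pvT]
  | cons a t ih =>
    cases t with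
    | nil => intro p s h; simp [pvGen, pvT]
    | cons b rest =>
      intro p s h
      rw [pvGen, List.foldl_append, pvT]
      by_cases hq : pvPairB a b = true
      · rw [hq]
        simp only [if_true, List.foldl_cons, List.foldl_nil]
        rw [PySem.List.pyGet?_neg_one]
        by_cases hbl : s.getLast? = some (p - 1)
        · rw [if_pos hbl, decide_eq_true hbl]
          simp only [if_true]
          rw [ih (p+1) s (fun x hx => by have := h x hx; omega)]
          have : decide (s.getLast? = some (p + 1 - 1)) = false := by
            rw [decide_eq_false_iff_not, hbl]
            intro hc
            have := Option.some.inj hc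
            omega
          rw [this]
        · rw [if_neg hbl]
          have hdec : decide (s.getLast? = some (p - 1)) = false := by
            rw [decide_eq_false_iff_not]; exact hbl
          rw [hdec]
          simp only [Bool.false_eq_true, if_false]
          rw [ih (p+1) (s ++ [p]) (by
            intro x hx
            rcases List.mem_append.mp hx with hx | hx
            · have := h x hx; omega
            · simp at hx; omega)]
          have : decide ((s ++ [p]).getLast? = some (p + 1 - 1)) = true := by
            rw [decide_eq_true_iff, List.getLast?_concat]
            congr 1; ring
          rw [this]
          simp
      · rw [Bool.not_eq_true] at hq
        rw [hq]
        simp only [Bool.false_eq_true, if_false, List.foldl_nil]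
        rw [ih (p+1) s (fun x hx => by have := h x hx; omega)]
        have : decide (s.getLast? = some (p + 1 - 1)) = false := by
          rw [decide_eq_false_iff_not]
          intro hc
          have hm := List.mem_of_getLast? hc
          have := h _ hm
          omega
        rw [this]

-- ---------- mapping the double positions to tokens is pvTpl ----------
lemma pvMap_T (cs : List Char) : ∀ (fuel j : Nat) (bl : Bool), cs.length - j ≤ fuel →
    (pvT (cs.drop j) (j : Int) bl).map (fun i =>
        ("OPERADOR_COMPARACION", String.ofList (PySem.List.slice cs (some i) (some (i + 2))), i, i + 1))
      = pvTpl (cs.drop j) (j : Int) bl := by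
  intro fuel
  induction fuel with
  | zero =>
    intro j bl hj
    rw [List.drop_eq_nil_of_le (by omega)]
    simp [pvT, pvTpl]
  | succ fuel ih =>
    intro j bl hj
    by_cases hlt : j + 1 < cs.length
    · have hd := pvA_drop_two cs j hlt
      have hd1 : cs.drop (j+1) = cs[j+1]'(by omega) :: cs.drop (j+2) := by
        rw [List.drop_eq_getElem_cons (by omega)]
      have hrec : ∀ bl', (pvT (cs.drop (j+1)) ((j : Int) + 1) bl').map (fun i =>
            ("OPERADOR_COMPARACION", String.ofList (PySem.List.slice cs (some i) (some (i + 2))), i, i + 1))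
          = pvTpl (cs.drop (j+1)) ((j : Int) + 1) bl' := by
        intro bl'
        have := ih (j+1) bl' (by omega)
        rw [show (((j:Nat)+1 : Nat) : Int) = (j : Int) + 1 by push_cast; ring] at this
        exact this
      rw [hd, pvT, pvTpl]
      by_cases hq : pvPairB (cs[j]'(by omega)) (cs[j+1]'(by omega)) = true
      · rw [hq]
        simp only [if_true]
        cases bl with
        | true =>
          simp only [if_true]
          rw [← hd1, hrec]
        | false =>
          simp only [Bool.false_eq_true, if_false, List.map_cons]
          rw [← hd1, hrec]
          rw [pvA_twochar cs j hlt]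
          rfl
      · rw [Bool.not_eq_true] at hq
        rw [hq]
        simp only [Bool.false_eq_true, if_false]
        rw [← hd1, hrec]
    · have hlen : (cs.drop j).length ≤ 1 := by simp; omega
      rcases he : cs.drop j with _ | ⟨a, rest⟩
      · simp [pvT, pvTpl]
      · rcases rest with _ | ⟨b, t⟩
        · simp [pvT, pvTpl]
        · rw [he] at hlen; simp at hlen

-- ---------- pvScan is a merge of the double and single token streams ----------
lemma pvScan_perm (cs : List Char) : ∀ (p : Int) (bl : Bool),
    (bl = true → cs.headD '=' = '=') →
    (pvScan cs p bl).Perm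
      (pvTpl cs p bl ++ pvGen pvSingB (fun a _ q => pvTokG a q) cs p) := by
  induction cs with
  | nil => intro p bl _; simp [pvScan, pvTpl, pvGen]
  | cons a t ih =>
    cases t with
    | nil => intro p bl _; simp [pvScan, pvTpl, pvGen]
    | cons b rest =>
      intro p bl hbl
      rw [pvScan, pvTpl, pvGen]
      by_cases hq : pvPairB a b = true
      · have hb : b = '=' := pvPairB_snd hq
        have hs : pvSingB a b = false := by
          rw [Bool.eq_false_iff]
          intro hc
          exact ((pvSingB_iff a b).mp hc).2 hb
        rw [hq, hs]
        simp only [if_true, Bool.false_eq_true, if_false, List.nil_append]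
        cases bl with
        | true =>
          simp only [if_true]
          exact ih (p+1) false (by simp)
        | false =>
          simp only [Bool.false_eq_true, if_false, List.cons_append]
          exact (ih (p+1) true (by intro _; simp [hb])).cons _
      · rw [Bool.not_eq_true] at hq
        rw [hq]
        simp only [Bool.false_eq_true, if_false]
        cases bl with
        | true =>
          have ha : a = '=' := hbl rfl
          have hs : pvSingB a b = false := by
            rw [Bool.eq_false_iff]
            intro hc
            rcases ((pvSingB_iff a b).mp hc).1 with h1 | h1 <;> rw [ha] at h1 <;> exact absurd h1 (by decide)
          rw [hs]
          simp only [if_true, Bool.false_eq_true, if_false, List.nil_append]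
          exact ih (p+1) false (by simp)
        | false =>
          simp only [Bool.false_eq_true, if_false]
          by_cases hs : pvSingB a b = true
          · rw [hs]
            simp only [if_true]
            refine ((ih (p+1) false (by simp)).cons (pvTokG a p)).trans ?_
            exact List.perm_middle.symm
          · rw [Bool.not_eq_true] at hs
            rw [hs]
            simp only [Bool.false_eq_true, if_false, List.nil_append]
            exact ih (p+1) false (by simp)

-- ---------- pvScan's positions strictly increase ----------
lemma pvScan_lb (cs : List Char) : ∀ (p : Int) (bl : Bool) (t : String × String × Int × Int),
    t ∈ pvScan cs p bl → p ≤ t.2.2.1 := by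
  induction cs with
  | nil => intro p bl t ht; simp [pvScan] at ht
  | cons a u ih =>
    cases u with
    | nil => intro p bl t ht; simp [pvScan] at ht
    | cons b rest =>
      intro p bl t ht
      rw [pvScan] at ht
      split at ht
      · split at ht
        · have := ih (p+1) false t ht; omega
        · rcases List.mem_cons.mp ht with h | h
          · subst h; simp [pvTokF]
          · have := ih (p+1) true t h; omega
      · split at ht
        · have := ih (p+1) false t ht; omega
        · split at ht
          · rcases List.mem_cons.mp ht with h | h
            · subst h; simp [pvTokG]
            · have := ih (p+1) false t h; omega
          · have := ih (p+1) false t ht; omega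

lemma pvScan_pairwise (cs : List Char) : ∀ (p : Int) (bl : Bool),
    (pvScan cs p bl).Pairwise (fun u v => u.2.2.1 < v.2.2.1) := by
  induction cs with
  | nil => intro p bl; simp [pvScan]
  | cons a u ih =>
    cases u with
    | nil => intro p bl; simp [pvScan]
    | cons b rest =>
      intro p bl
      rw [pvScan]
      split
      · split
        · exact ih (p+1) false
        · refine List.Pairwise.cons ?_ (ih (p+1) true)
          intro v hv
          have := pvScan_lb (b :: rest) (p+1) true v hv
          simp [pvTokF]; omega
      · split
        · exact ih (p+1) false
        · split
          · refine List.Pairwise.cons ?_ (ih (p+1) false)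
            intro v hv
            have := pvScan_lb (b :: rest) (p+1) false v hv
            simp [pvTokG]; omega
          · exact ih (p+1) false

-- ===== VERDICT (by name: the statement is the Claim_ definition above) =====
theorem tipo_operador_comparacion_spec : Claim_equal_tipo_operador_comparacion := by
  intro entrada _
  unfold Spec_tipo_operador_comparacion tipo_operador_comparacion tipo_operador_comparacion_alt
  set cs := entrada.toList with hcs
  -- B side: identify the staged passes
  have hcand : ((PySem.List.pyRange 0 ((cs.length : Int) - 1) 1).filter (fun i =>
      decide (PySem.List.slice cs (some i) (some (i + 2)) = ['=', '='] ∨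
              PySem.List.slice cs (some i) (some (i + 2)) = ['!', '='] ∨
              PySem.List.slice cs (some i) (some (i + 2)) = ['<', '='] ∨
              PySem.List.slice cs (some i) (some (i + 2)) = ['>', '='])))
        = pvGen pvPairB (fun _ _ q => q) cs 0 := by
    have := pvGen_eq cs (fun i =>
      decide (PySem.List.slice cs (some i) (some (i + 2)) = ['=', '='] ∨
              PySem.List.slice cs (some i) (some (i + 2)) = ['!', '='] ∨
              PySem.List.slice cs (some i) (some (i + 2)) = ['<', '='] ∨
              PySem.List.slice cs (some i) (some (i + 2)) = ['>', '='])) (fun i => i)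
      pvPairB (fun _ _ q => q)
      (by
        intro k hk
        have hgd : cs.getD k ' ' = cs[k]'(by omega) := List.getD_eq_getElem cs ' ' (by omega)
        have hgd1 : cs.getD (k+1) ' ' = cs[k+1]'(by omega) := List.getD_eq_getElem cs ' ' (by omega)
        show decide _ = pvPairB (cs.getD k ' ') (cs.getD (k+1) ' ')
        rw [pvA_twochar cs k hk, hgd, hgd1]
        simp only [pvPairB])
      (fun _ _ => rfl) cs.length 0 (by omega)
    simpa using this
  have hsimp : (((PySem.List.pyRange 0 ((cs.length : Int) - 1) 1).filter (fun i =>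
      decide ((PySem.List.pyGetD cs i ' ' = '<' ∨ PySem.List.pyGetD cs i ' ' = '>') ∧
              PySem.List.pyGetD cs (i + 1) ' ' ≠ '='))).map (fun i =>
      ("OPERADOR_COMPARACION", String.ofList [PySem.List.pyGetD cs i ' '], i, i)))
        = pvGen pvSingB (fun a _ q => pvTokG a q) cs 0 := by
    have := pvGen_eq cs (fun i =>
      decide ((PySem.List.pyGetD cs i ' ' = '<' ∨ PySem.List.pyGetD cs i ' ' = '>') ∧
              PySem.List.pyGetD cs (i + 1) ' ' ≠ '='))
      (fun i => ("OPERADOR_COMPARACION", String.ofList [PySem.List.pyGetD cs i ' '], i, i))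
      pvSingB (fun a _ q => pvTokG a q)
      (by
        intro k hk
        have e1 : PySem.List.pyGetD cs (k : Int) ' ' = cs.getD k ' ' :=
          PySem.List.pyGetD_natCast cs k ' '
        have e2 : PySem.List.pyGetD cs ((k : Int) + 1) ' ' = cs.getD (k+1) ' ' := by
          rw [show ((k : Int) + 1) = ((k + 1 : Nat) : Int) by omega]
          exact PySem.List.pyGetD_natCast cs (k+1) ' '
        show decide _ = pvSingB (cs.getD k ' ') (cs.getD (k+1) ' ')
        rw [e1, e2]
        simp [pvSingB, pvLG])
      (by
        intro k hk
        simp only [PySem.List.pyGetD_natCast, pvTokG]) cs.length 0 (by omega)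
    simpa using this
  have hA : pvA_loop cs 0 [] = pvScan cs 0 false := by
    rw [pvA_loop_eq_go]
    simp only [List.drop_zero, List.nil_append, Int.natCast_zero]
    exact pvGo_eq_scan cs 0
  have hdob : (pvGen pvPairB (fun _ _ q => q) cs 0).foldl
      (fun s i => if PySem.List.pyGet? s (-1) = some (i - 1) then s else s ++ [i]) []
        = pvT cs 0 false := by
    rw [pvFold_eq_T cs 0 [] (by simp)]
    simp
  have hmap : (pvT cs 0 false).map (fun i =>
      ("OPERADOR_COMPARACION", String.ofList (PySem.List.slice cs (some i) (some (i + 2))), i, i + 1))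
        = pvTpl cs 0 false := by
    have := pvMap_T cs cs.length 0 false (by omega)
    simpa using this
  have hsorted := PySem.List.sorted_eq_of_perm_of_pairwise_lt
    (pvTpl cs 0 false ++ pvGen pvSingB (fun a _ q => pvTokG a q) cs 0)
    (pvScan cs 0 false) (fun t => t.2.2.1)
    (pvScan_perm cs 0 false (by simp)) (pvScan_pairwise cs 0 false)
  simp only [hA, hcand, hdob, hmap, hsimp, hsorted]
  by_cases h : pvScan cs 0 false = [] <;> simp [h]
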